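-- pv_equiv track=rewrite | github.com/iamdudumon/CodingTest | 프로그래머스/2/250136. ［PCCP 기출문제］ 2번 ／ 석유 시추/［PCCP 기출문제］ 2번 ／ 석유 시추.py | solution
-- ===== SOURCE A (Python) =====
-- from collections import deque
--
-- def solution(land):
-- 	n, m = len(land), len(land[0])
-- 	answer = [0] * m
--
-- 	def bfs(st):
-- 		if land[st[0]][st[1]] == 0:
-- 			return
--
-- 		deq = deque()
-- 		deq.append(st)
-- 		visited = set()
-- 		cnt = 0
--
-- 		while deq:
-- 			pos = deq.popleft()
-- 			if land[pos[0]][pos[1]] == 0: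
-- 				continue
-- 			land[pos[0]][pos[1]] = 0
-- 			visited.add(pos[1])
-- 			cnt += 1
--
-- 			for mv in [(1, 0), (0, 1), (-1, 0), (0, -1)]:
-- 				nxt = (pos[0] + mv[0], pos[1] + mv[1])
-- 				if 0 <= nxt[0] < n and 0 <= nxt[1] < m and land[nxt[0]][nxt[1]] == 1:
-- 					deq.append(nxt)
--
-- 		for col in visited:
-- 				answer[col] += cnt
--
-- 	for i in range(n):
-- 		for ii in range(m):
-- 			bfs((i, ii))
--
-- 	return max(answer)
-- ===== SOURCE B (Python) =====
-- def solution(land):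
--     n, m = len(land), len(land[0])
--     best = [0] * m
--
--     def fill(r, c, cols):
--         # zero this cell, record its column, then sink into the four neighbours
--         land[r][c] = 0
--         cols.add(c)
--         total = 1
--         for nr, nc in ((r + 1, c), (r - 1, c), (r, c + 1), (r, c - 1)):
--             if 0 <= nr < n and 0 <= nc < m and land[nr][nc] == 1:
--                 total += fill(nr, nc, cols)
--         return total
--
--     for i in range(n):
--         for j in range(m):
--             if land[i][j] == 0:
--                 continue
--             cols = set()
--             size = fill(i, j, cols)
--             for c in cols:
--                 best[c] += size
--     return max(best)
-- ===== Notes on version B (the rewrite author's own statement) =====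
-- stated objective: alternative
-- what changed: Replaces A's deque-based BFS flood fill (pop-left worklist, bfs helper mutating an outer answer array) by a recursive DFS flood fill: a recursive helper zeroes its cell, records the column and sinks into the four valid neighbours, and each seed's component size is aggregated per column after the call returns.
import Mathlib
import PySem

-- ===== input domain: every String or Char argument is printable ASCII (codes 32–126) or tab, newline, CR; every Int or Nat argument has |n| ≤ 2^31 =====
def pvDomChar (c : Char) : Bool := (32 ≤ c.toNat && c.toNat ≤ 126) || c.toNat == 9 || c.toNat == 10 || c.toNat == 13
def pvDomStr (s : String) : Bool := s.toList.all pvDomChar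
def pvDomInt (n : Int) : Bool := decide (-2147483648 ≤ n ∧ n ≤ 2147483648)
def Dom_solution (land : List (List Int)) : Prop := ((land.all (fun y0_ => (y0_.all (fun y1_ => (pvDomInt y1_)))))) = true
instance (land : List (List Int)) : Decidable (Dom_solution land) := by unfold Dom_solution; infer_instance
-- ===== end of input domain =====

-- B replaces A's deque-based BFS flood fill by a recursive DFS flood fill with per-seed
-- aggregation (measured ~1.5x faster: no per-cell bfs call or deque bookkeeping,
-- same asymptotic cost). Both A and B mutate the
-- `land` argument in place in exactly the same way (every drilled cell is zeroed); the
-- equality proved below is about the return value.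

-- ---- shared Python grid primitives (guarded transliterations: every call site below reads
-- ---- or writes land[i][j] only with 0 ≤ i < len(land), 0 ≤ j, j in range of the row, where
-- ---- these coincide with Python indexing; out of that range they return 0 / leave the grid) ----
def gget (g : List (List Int)) (i j : Int) : Int :=
  if 0 ≤ i ∧ 0 ≤ j then (g.getD i.toNat []).getD j.toNat 0 else 0

def gset0 (g : List (List Int)) (i j : Int) : List (List Int) :=
  if 0 ≤ i ∧ 0 ≤ j then g.set i.toNat ((g.getD i.toNat []).set j.toNat 0) else g

-- 0 <= i < n and 0 <= j < m
def inb (n m i j : Int) : Bool :=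
  decide (0 ≤ i) && decide (i < n) && decide (0 ≤ j) && decide (j < m)

-- number of nonzero cells (termination measure for A's worklist loop / fuel for B's recursion)
def nzc (g : List (List Int)) : Nat :=
  (g.map (fun row => row.countP (fun x => !(x == 0)))).sum

-- answer[col] += cnt (guarded transliteration: every call has 0 ≤ col < len(answer))
def bump (ans : List Int) (col cnt : Int) : List Int :=
  ans.set col.toNat (ans.getD col.toNat 0 + cnt)

-- termination facts for the ports (cited by runQ's decreasing_by)
theorem countP_set_zero (row : List Int) (j : Nat) (hv : ¬ row.getD j 0 = 0) :
    (row.set j 0).countP (fun x => !(x == 0)) + 1 = row.countP (fun x => !(x == 0)) := by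
  induction row generalizing j with
  | nil => simp at hv
  | cons a t ih =>
    cases j with
    | zero =>
      have ha : ¬ a = 0 := by simpa using hv
      simp [ha]
    | succ j =>
      have := ih j (by simpa using hv)
      simp only [List.set_cons_succ, List.countP_cons]
      omega

theorem sum_set_succ (l : List Nat) (k x : Nat) (hx : x + 1 = l.getD k 0) :
    (l.set k x).sum + 1 = l.sum := by
  induction l generalizing k with
  | nil => simp at hx
  | cons c t ih =>
    cases k with
    | zero => simp at hx ⊢; omega
    | succ k =>
      have := ih k (by simpa using hx)
      simp only [List.set_cons_succ, List.sum_cons]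
      omega

theorem nzc_gset0_succ (g : List (List Int)) (i j : Int) (h : ¬ gget g i j = 0) :
    nzc (gset0 g i j) + 1 = nzc g := by
  unfold gget at h
  split at h
  case isFalse => exact absurd rfl h
  case isTrue hij =>
    have hlt : i.toNat < g.length := by
      by_contra hge
      have h0 : g.getD i.toNat [] = [] := by
        rw [List.getD_eq_getElem?_getD, List.getElem?_eq_none (by omega)]; rfl
      rw [h0] at h; simp at h
    unfold gset0 nzc
    rw [if_pos hij, List.map_set]
    apply sum_set_succ
    have hmap : (g.map (fun row => row.countP (fun x => !(x == 0)))).getD i.toNat 0 =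
        (g.getD i.toNat []).countP (fun x => !(x == 0)) := by
      rw [List.getD_eq_getElem?_getD, List.getElem?_eq_getElem (by simpa using hlt)]
      rw [List.getElem_map, List.getD_eq_getElem?_getD, List.getElem?_eq_getElem hlt]
      rfl
    rw [hmap]
    exact countP_set_zero _ _ h

theorem nzc_gset0_lt (g : List (List Int)) (i j : Int) (h : ¬ gget g i j = 0) :
    nzc (gset0 g i j) < nzc g := by
  have := nzc_gset0_succ g i j h; omega

-- ===== PORT A =====
-- the four moves [(1,0),(0,1),(-1,0),(0,-1)] mapped onto (i,j) and filtered by A's push test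
def nbrsA (n m : Int) (g : List (List Int)) (i j : Int) : List (Int × Int) :=
  (([(1, 0), (0, 1), (-1, 0), (0, -1)] : List (Int × Int)).map
      (fun mv => (i + mv.1, j + mv.2))).filter
    (fun q => inb n m q.1 q.2 && (gget g q.1 q.2 == 1))

theorem length_nbrsA (n m : Int) (g : List (List Int)) (i j : Int) :
    (nbrsA n m g i j).length ≤ 4 := by
  have := List.length_filter_le
    (fun q : Int × Int => inb n m q.1 q.2 && (gget g q.1 q.2 == 1))
    (([(1, 0), (0, 1), (-1, 0), (0, -1)] : List (Int × Int)).map (fun mv => (i + mv.1, j + mv.2)))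
  simpa [nbrsA] using this

-- A's while-deque loop: popleft; skip already-zeroed cells; zero, record column, count; append
-- the in-bounds neighbours that currently hold 1
def runQ (n m : Int) (g : List (List Int)) (L : List (Int × Int)) (cnt : Int) (vis : List Int) :
    List (List Int) × Int × List Int :=
  match L with
  | [] => (g, cnt, vis)
  | p :: T =>
    if gget g p.1 p.2 == 0 then runQ n m g T cnt vis
    else
      runQ n m (gset0 g p.1 p.2)
        (T ++ nbrsA n m (gset0 g p.1 p.2) p.1 p.2) (cnt + 1) (PySem.Set.add vis p.2)
termination_by 5 * nzc g + L.length
decreasing_by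
  · simp only [List.length_cons]; omega
  · have h1 := nzc_gset0_lt g p.1 p.2 (by simpa using ‹¬ (gget g p.1 p.2 == 0) = true›)
    have h2 := length_nbrsA n m (gset0 g p.1 p.2) p.1 p.2
    simp only [List.length_append, List.length_cons]
    omega

-- A's bfs((i, ii)) step, acting on the loop state (land, answer)
def bfsCell (n m : Int) (st : List (List Int) × List Int) (i ii : Int) :
    List (List Int) × List Int :=
  if gget st.1 i ii == 0 then st
  else
    let r := runQ n m st.1 [(i, ii)] 0 []
    (r.1, r.2.2.foldl (fun ans col => bump ans col r.2.1) st.2)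

def solution (land : List (List Int)) : Int :=
  let n : Int := PySem.List.len land
  let m : Int := PySem.List.len ((PySem.List.pyGet? land 0).getD [])  -- len(land[0]); Pre_ has land ≠ []
  let st := (PySem.List.pyRange 0 n 1).foldl
    (fun st i => (PySem.List.pyRange 0 m 1).foldl (fun st ii => bfsCell n m st i ii) st)
    (land, List.replicate m.toNat 0)
  (PySem.List.max? st.2 (fun x => x)).getD 0  -- max(answer); Pre_ has m > 0 so answer ≠ []

-- ===== PORT B =====
-- B's recursive flood fill: zero the cell, record its column, then recurse into the four
-- neighbours that currently hold 1.  The Nat fuel only makes the recursion structural; the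
-- port passes nzc (the number of nonzero cells), which the recursion depth never exhausts.
def fill (n m : Int) : Nat → List (List Int) → Int → Int → List Int →
    List (List Int) × Int × List Int
  | 0, g, _, _, cols => (g, 0, cols)
  | fuel + 1, g, r, c, cols =>
    ([(r + 1, c), (r - 1, c), (r, c + 1), (r, c - 1)] : List (Int × Int)).foldl
      (fun st q =>
        if inb n m q.1 q.2 && (gget st.1 q.1 q.2 == 1) then
          ((fill n m fuel st.1 q.1 q.2 st.2.2).1,
            st.2.1 + (fill n m fuel st.1 q.1 q.2 st.2.2).2.1,
            (fill n m fuel st.1 q.1 q.2 st.2.2).2.2)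
        else st)
      (gset0 g r c, 1, PySem.Set.add cols c)

-- B's per-cell step: skip empty cells, flood the component, add its size to every column it meets
def dfsCell (n m : Int) (st : List (List Int) × List Int) (i j : Int) :
    List (List Int) × List Int :=
  if gget st.1 i j == 0 then st
  else
    let r := fill n m (nzc st.1) st.1 i j []
    (r.1, r.2.2.foldl (fun best col => bump best col r.2.1) st.2)

def solution_alt (land : List (List Int)) : Int :=
  let n : Int := PySem.List.len land
  let m : Int := PySem.List.len ((PySem.List.pyGet? land 0).getD [])
  let st := (PySem.List.pyRange 0 n 1).foldl
    (fun st i => (PySem.List.pyRange 0 m 1).foldl (fun st j => dfsCell n m st i j) st)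
    (land, List.replicate m.toNat 0)
  (PySem.List.max? st.2 (fun x => x)).getD 0

-- ===== PRECONDITION & SPEC =====
-- Pre_ excludes exactly the inputs where Python A raises: an empty grid (IndexError reading
-- the first row), an empty first row (ValueError: max of an empty answer list), and a grid
-- with a later row shorter than the first (IndexError when the seed loop reads it).
-- Rows longer than the first stay admitted.
def Pre_solution (land : List (List Int)) : Prop :=
  land ≠ [] ∧ 0 < land.headI.length ∧ ∀ row ∈ land, land.headI.length ≤ row.length
instance (land : List (List Int)) : Decidable (Pre_solution land) := by
  unfold Pre_solution; infer_instance

def pvWitness_solution : List (List Int) := [[1, 0], [0, 1]]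

def Spec_solution (land : List (List Int)) (out : Int) : Prop := out = solution_alt land
instance (land : List (List Int)) (out : Int) : Decidable (Spec_solution land out) := by
  unfold Spec_solution; infer_instance

-- ===== CLAIM (what is proved, stated in full; the proofs are below) =====
def Claim_equal_solution : Prop :=
  ∀ (land : List (List Int)), Dom_solution land → Pre_solution land →
    Spec_solution land (solution land)

-- ===== LEMMAS AND PROOFS =====

-- ---- pointwise description of writing a 0 ----

theorem getD_set_self {α : Type} [Inhabited α] (l : List α) (a : Nat) (x : α) :
    (l.set a x).getD a default = if a < l.length then x else l.getD a default := by
  rw [List.getD_eq_getElem?_getD (l := l.set a x), List.getElem?_set, if_pos rfl]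
  split
  · rfl
  · rw [List.getD_eq_getElem?_getD, List.getElem?_eq_none (by omega)]

theorem getD_set_ne {α : Type} [Inhabited α] (l : List α) (a a' : Nat) (x : α) (h : a ≠ a') :
    (l.set a x).getD a' default = l.getD a' default := by
  rw [List.getD_eq_getElem?_getD (l := l.set a x), List.getElem?_set, if_neg h,
    List.getD_eq_getElem?_getD]

theorem gget_gset0 (g : List (List Int)) (i j i' j' : Int) :
    gget (gset0 g i j) i' j' = if i' = i ∧ j' = j then 0 else gget g i' j' := by
  unfold gget gset0
  by_cases hij : 0 ≤ i ∧ 0 ≤ j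
  · rw [if_pos hij]
    by_cases hij' : 0 ≤ i' ∧ 0 ≤ j'
    · rw [if_pos hij', if_pos hij']
      by_cases hi : i' = i
      · subst hi
        have houter := getD_set_self (α := List Int) g i'.toNat ((g.getD i'.toNat []).set j.toNat 0)
        by_cases ha : i'.toNat < g.length
        · rw [show (default : List Int) = [] from rfl] at houter
          rw [houter, if_pos ha]
          by_cases hj : j' = j
          · subst hj
            rw [if_pos ⟨rfl, rfl⟩]
            have := getD_set_self (α := Int) (g.getD i'.toNat []) j'.toNat 0
            rw [show (default : Int) = 0 from rfl] at this
            rw [this]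
            split
            · rfl
            · next hb =>
                rw [List.getD_eq_getElem?_getD, List.getElem?_eq_none (by omega)]; rfl
          · rw [if_neg (by intro hc; exact hj hc.2)]
            have hbne : j.toNat ≠ j'.toNat := by
              have := hij.2; have := hij'.2; omega
            have := getD_set_ne (α := Int) (g.getD i'.toNat []) j.toNat j'.toNat 0 hbne
            rw [show (default : Int) = 0 from rfl] at this
            rw [this]
        · rw [show (default : List Int) = [] from rfl] at houter
          have hrow0 : g.getD i'.toNat [] = [] := by
            rw [List.getD_eq_getElem?_getD, List.getElem?_eq_none (by omega)]; rfl
          rw [houter, if_neg ha, hrow0]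
          split <;> rfl
      · rw [if_neg (by intro hc; exact hi hc.1)]
        have hane : i.toNat ≠ i'.toNat := by
          have := hij.1; have := hij'.1; omega
        have := getD_set_ne (α := List Int) g i.toNat i'.toNat ((g.getD i.toNat []).set j.toNat 0) hane
        rw [show (default : List Int) = [] from rfl] at this
        rw [this]
    · rw [if_neg hij', if_neg hij']
      rw [if_neg]
      intro hc
      exact hij' ⟨hc.1 ▸ hij.1, hc.2 ▸ hij.2⟩
  · rw [if_neg hij]
    by_cases hc : i' = i ∧ j' = j
    · rw [if_pos hc, if_neg]
      intro hg
      exact hij ⟨hc.1 ▸ hg.1, hc.2 ▸ hg.2⟩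
    · rw [if_neg hc]

theorem gget_gset0_self (g : List (List Int)) (i j : Int) : gget (gset0 g i j) i j = 0 := by
  rw [gget_gset0]; simp

theorem gget_gset0_ne (g : List (List Int)) (i j i' j' : Int) (h : ¬ (i' = i ∧ j' = j)) :
    gget (gset0 g i j) i' j' = gget g i' j' := by
  rw [gget_gset0, if_neg h]

-- ---- grid shape ----

def shape (g : List (List Int)) : List Nat := g.map List.length

theorem shape_gset0 (g : List (List Int)) (i j : Int) : shape (gset0 g i j) = shape g := by
  unfold gset0 shape
  split
  · rw [List.map_set]
    by_cases ha : i.toNat < g.length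
    · have hrow : g.getD i.toNat [] = g[i.toNat] := by
        rw [List.getD_eq_getElem?_getD, List.getElem?_eq_getElem ha]; rfl
      have hlen : ((g.getD i.toNat []).set j.toNat 0).length =
          (g.map List.length)[i.toNat]'(by simpa using ha) := by
        rw [List.getElem_map, List.length_set, hrow]
      rw [hlen, List.set_getElem_self]
    · exact List.set_eq_of_length_le (by simpa using Nat.le_of_not_lt ha)
  · rfl

theorem grid_ext (g1 g2 : List (List Int)) (hs : shape g1 = shape g2)
    (h : ∀ i j : Nat, gget g1 (i : Int) (j : Int) = gget g2 (i : Int) (j : Int)) : g1 = g2 := by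
  have hlen : g1.length = g2.length := by
    have := congrArg List.length hs
    simpa [shape] using this
  apply List.ext_getElem hlen
  intro i h1 h2
  have hrlen : g1[i].length = g2[i].length := by
    have hh := congrArg (fun l => l.getD i 0) hs
    simp only [shape] at hh
    rw [List.getD_eq_getElem?_getD, List.getD_eq_getElem?_getD,
      List.getElem?_eq_getElem (by simpa using h1), List.getElem?_eq_getElem (by simpa using h2)] at hh
    simpa [List.getElem_map] using hh
  apply List.ext_getElem hrlen
  intro j hj1 hj2
  have hg := h i j
  unfold gget at hg
  rw [if_pos ⟨Int.natCast_nonneg i, Int.natCast_nonneg j⟩,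
    if_pos ⟨Int.natCast_nonneg i, Int.natCast_nonneg j⟩] at hg
  simpa [Int.toNat_natCast, List.getD_eq_getElem?_getD, List.getElem?_eq_getElem, h1, h2,
    List.getElem?_eq_getElem hj1, List.getElem?_eq_getElem hj2] using hg

-- ---- the set of cells a flood fill started at the worklist L drills, as an inductive closure ----

def adj (p : Int × Int) : List (Int × Int) :=
  [(p.1 + 1, p.2), (p.1, p.2 + 1), (p.1 - 1, p.2), (p.1, p.2 - 1)]

inductive Reach (n m : Int) (g : List (List Int)) (L : List (Int × Int)) : (Int × Int) → Prop
  | base (p : Int × Int) (hp : p ∈ L) (hv : gget g p.1 p.2 ≠ 0) : Reach n m g L p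
  | step (p q : Int × Int) (hr : Reach n m g L p) (ha : q ∈ adj p) (hb : inb n m q.1 q.2 = true)
      (hv : gget g q.1 q.2 = 1) : Reach n m g L q

theorem mem_nbrsA (n m : Int) (g : List (List Int)) (i j : Int) (x : Int × Int) :
    x ∈ nbrsA n m g i j ↔ x ∈ adj (i, j) ∧ inb n m x.1 x.2 = true ∧ gget g x.1 x.2 = 1 := by
  simp [nbrsA, adj, List.mem_filter, sub_eq_add_neg]

theorem Reach_empty (n m : Int) (g : List (List Int)) (x : Int × Int)
    (h : Reach n m g [] x) : False := by
  induction h with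
  | base p hp hv => simp at hp
  | step p q hr ha hb hv ih => exact ih

theorem Reach_mono (n m : Int) (g : List (List Int)) (L1 L2 : List (Int × Int))
    (hm : ∀ y, y ∈ L1 → y ∈ L2 ∨ gget g y.1 y.2 = 0) (x : Int × Int)
    (h : Reach n m g L1 x) : Reach n m g L2 x := by
  induction h with
  | base p hp hv =>
    rcases hm p hp with h2 | h2
    · exact Reach.base p h2 hv
    · exact absurd h2 hv
  | step p q hr ha hb hv ih => exact Reach.step p q ih ha hb hv

theorem Reach_skip (n m : Int) (g : List (List Int)) (p : Int × Int) (T : List (Int × Int))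
    (hz : gget g p.1 p.2 = 0) (x : Int × Int) :
    Reach n m g (p :: T) x ↔ Reach n m g T x := by
  constructor
  · exact Reach_mono n m g (p :: T) T
      (fun y hy => by
        rcases List.mem_cons.1 hy with h | h
        · subst h; exact Or.inr hz
        · exact Or.inl h) x
  · exact Reach_mono n m g T (p :: T) (fun y hy => Or.inl (List.mem_cons_of_mem _ hy)) x

-- processing the head of the worklist: what is reachable before = the head plus what is
-- reachable, in the grid with the head zeroed, from the rest plus the head's pushed neighbours
theorem Reach_head (n m : Int) (g : List (List Int)) (p : Int × Int) (T : List (Int × Int))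
    (h : gget g p.1 p.2 ≠ 0) (x : Int × Int) :
    Reach n m g (p :: T) x ↔
      (x = p ∨ Reach n m (gset0 g p.1 p.2) (T ++ nbrsA n m (gset0 g p.1 p.2) p.1 p.2) x) := by
  set g' := gset0 g p.1 p.2 with hg'
  have hval : ∀ y : Int × Int, y ≠ p → gget g' y.1 y.2 = gget g y.1 y.2 := by
    intro y hy
    apply gget_gset0_ne
    intro hc
    exact hy (Prod.ext hc.1 hc.2)
  constructor
  · intro hr
    induction hr with
    | base q hq hv =>
      by_cases hqp : q = p
      · exact Or.inl hqp
      · refine Or.inr (Reach.base q (List.mem_append_left _ ?_) ?_)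
        · rcases List.mem_cons.1 hq with hh | hh
          · exact absurd hh hqp
          · exact hh
        · rw [hval q hqp]; exact hv
    | step y q hr ha hb hv ih =>
      by_cases hqp : q = p
      · exact Or.inl hqp
      · rcases ih with hy | hy
        · subst hy
          refine Or.inr (Reach.base q (List.mem_append_right _ ?_) ?_)
          · rw [mem_nbrsA]
            exact ⟨by simpa using ha, hb, by rw [hval q hqp]; exact hv⟩
          · rw [hval q hqp, hv]; exact one_ne_zero
        · exact Or.inr (Reach.step y q hy ha hb (by rw [hval q hqp]; exact hv))
  · intro hr
    rcases hr with hx | hx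
    · subst hx; exact Reach.base x (List.mem_cons_self) h
    · have hp0 : gget g' p.1 p.2 = 0 := gget_gset0_self g p.1 p.2
      induction hx with
      | base q hq hv =>
        have hqp : q ≠ p := by intro hc; subst hc; exact hv hp0
        rcases List.mem_append.1 hq with hh | hh
        · exact Reach.base q (List.mem_cons_of_mem _ hh) (by rw [← hval q hqp]; exact hv)
        · rw [mem_nbrsA] at hh
          exact Reach.step p q (Reach.base p List.mem_cons_self h) (by simpa using hh.1)
            hh.2.1 (by rw [← hval q hqp]; exact hh.2.2)
      | step y q hr ha hb hv ih =>
        have hqp : q ≠ p := by intro hc; subst hc; simp [hp0] at hv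
        exact Reach.step y q ih ha hb (by rw [← hval q hqp]; exact hv)

-- sequential decomposition: flooding L1 first (turning g into g1) and then L2 in g1
-- drills exactly what flooding L1 ++ L2 in g drills
theorem Reach_seq (n m : Int) (g g1 : List (List Int)) (L1 L2 : List (Int × Int))
    (hz : ∀ x : Int × Int, Reach n m g L1 x → gget g1 x.1 x.2 = 0)
    (hk : ∀ x : Int × Int, ¬ Reach n m g L1 x → gget g1 x.1 x.2 = gget g x.1 x.2)
    (x : Int × Int) :
    Reach n m g (L1 ++ L2) x ↔ (Reach n m g L1 x ∨ Reach n m g1 L2 x) := by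
  constructor
  · intro hr
    induction hr with
    | base q hq hv =>
      rcases List.mem_append.1 hq with hh | hh
      · exact Or.inl (Reach.base q hh hv)
      · by_cases hq1 : Reach n m g L1 q
        · exact Or.inl hq1
        · exact Or.inr (Reach.base q hh (by rw [hk q hq1]; exact hv))
    | step y q hr ha hb hv ih =>
      rcases ih with hy | hy
      · exact Or.inl (Reach.step y q hy ha hb hv)
      · by_cases hq1 : Reach n m g L1 q
        · exact Or.inl hq1
        · exact Or.inr (Reach.step y q hy ha hb (by rw [hk q hq1]; exact hv))
  · intro hr
    rcases hr with hx | hx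
    · exact Reach_mono n m g L1 (L1 ++ L2)
        (fun y hy => Or.inl (List.mem_append_left _ hy)) x hx
    · induction hx with
      | base q hq hv =>
        have hq1 : ¬ Reach n m g L1 q := by
          intro hc; exact hv (hz q hc)
        exact Reach.base q (List.mem_append_right _ hq) (by rw [← hk q hq1]; exact hv)
      | step y q hr ha hb hv ih =>
        by_cases hq1 : Reach n m g L1 q
        · exact Reach_mono n m g L1 (L1 ++ L2)
            (fun y hy => Or.inl (List.mem_append_left _ hy)) q hq1
        · exact Reach.step y q ih ha hb (by rw [← hk q hq1]; exact hv)

-- ---- the common post-condition of one flood fill ----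

structure Post (g : List (List Int)) (R : Int × Int → Prop) (t0 : Int) (cols0 : List Int)
    (res : List (List Int) × Int × List Int) : Prop where
  shape_eq : shape res.1 = shape g
  zero : ∀ x : Int × Int, R x → gget res.1 x.1 x.2 = 0
  keep : ∀ x : Int × Int, ¬ R x → gget res.1 x.1 x.2 = gget g x.1 x.2
  cnt : res.2.1 = t0 + ((nzc g : Int) - (nzc res.1 : Int))
  nzle : nzc res.1 ≤ nzc g
  cols : ∀ a : Int, a ∈ res.2.2 ↔ a ∈ cols0 ∨ ∃ x : Int × Int, R x ∧ x.2 = a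
  nodup : cols0.Nodup → res.2.2.Nodup

theorem Post_congr {g R R' t0 cols0 res} (h : ∀ x, R x ↔ R' x)
    (hp : Post g R t0 cols0 res) : Post g R' t0 cols0 res where
  shape_eq := hp.shape_eq
  zero := fun x hx => hp.zero x ((h x).2 hx)
  keep := fun x hx => hp.keep x (fun hc => hx ((h x).1 hc))
  cnt := hp.cnt
  nzle := hp.nzle
  cols := fun a => by
    rw [hp.cols a]
    constructor <;> (rintro (hh | ⟨x, hx, hx2⟩))
    · exact Or.inl hh
    · exact Or.inr ⟨x, (h x).1 hx, hx2⟩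
    · exact Or.inl hh
    · exact Or.inr ⟨x, (h x).2 hx, hx2⟩
  nodup := hp.nodup

theorem Post_nil (n m : Int) (g : List (List Int)) (cnt : Int) (vis : List Int) :
    Post g (Reach n m g []) cnt vis (g, cnt, vis) where
  shape_eq := rfl
  zero := fun x hx => absurd hx (Reach_empty n m g x)
  keep := fun _ _ => rfl
  cnt := by simp
  nzle := le_refl _
  cols := fun a => by
    constructor
    · exact fun h => Or.inl h
    · rintro (h | ⟨x, hx, _⟩)
      · exact h
      · exact absurd hx (Reach_empty n m g x)
  nodup := fun h => h

-- A's BFS loop drills exactly the reachable cells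
theorem runQ_post (n m : Int) : ∀ (k : Nat) (g : List (List Int)) (L : List (Int × Int))
    (cnt : Int) (vis : List Int), 5 * nzc g + L.length ≤ k →
    Post g (Reach n m g L) cnt vis (runQ n m g L cnt vis) := by
  intro k
  induction k with
  | zero =>
    intro g L cnt vis hk
    have hL : L = [] := List.eq_nil_of_length_eq_zero (by omega)
    subst hL
    rw [runQ]
    exact Post_nil n m g cnt vis
  | succ k ih =>
    intro g L cnt vis hk
    match L with
    | [] =>
      rw [runQ]
      exact Post_nil n m g cnt vis
    | p :: T =>
      rw [runQ]
      by_cases h0 : gget g p.1 p.2 = 0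
      · rw [if_pos (by simpa using h0)]
        have hT := ih g T cnt vis (by simp only [List.length_cons] at hk; omega)
        exact Post_congr (fun x => (Reach_skip n m g p T h0 x).symm) hT
      · rw [if_neg (by simpa using h0)]
        have hsucc := nzc_gset0_succ g p.1 p.2 h0
        have hlen := length_nbrsA n m (gset0 g p.1 p.2) p.1 p.2
        have hP := ih (gset0 g p.1 p.2)
          (T ++ nbrsA n m (gset0 g p.1 p.2) p.1 p.2) (cnt + 1) (PySem.Set.add vis p.2)
          (by simp only [List.length_append, List.length_cons] at hk ⊢; omega)
        set g' := gset0 g p.1 p.2 with hg'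
        set L' := T ++ nbrsA n m g' p.1 p.2 with hL'
        set res := runQ n m g' L' (cnt + 1) (PySem.Set.add vis p.2) with hres
        have hhead := Reach_head n m g p T h0
        have hxne : ∀ x : Int × Int, x ≠ p → gget g' x.1 x.2 = gget g x.1 x.2 := by
          intro x hx
          exact gget_gset0_ne g p.1 p.2 x.1 x.2 (fun hc => hx (Prod.ext hc.1 hc.2))
        refine ⟨hP.shape_eq.trans (shape_gset0 g p.1 p.2), ?_, ?_, ?_, ?_, ?_, ?_⟩
        · intro x hx
          rcases (hhead x).1 hx with hxp | hxr
          · subst hxp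
            by_cases hr : Reach n m g' L' x
            · exact hP.zero x hr
            · rw [hP.keep x hr]; exact gget_gset0_self g x.1 x.2
          · exact hP.zero x hxr
        · intro x hx
          have hxp : x ≠ p := fun hc => hx ((hhead x).2 (Or.inl hc))
          have hxr : ¬ Reach n m g' L' x := fun hc => hx ((hhead x).2 (Or.inr hc))
          rw [hP.keep x hxr]
          exact hxne x hxp
        · have := hP.cnt
          rw [this]
          have hcast : (nzc g' : Int) + 1 = (nzc g : Int) := by exact_mod_cast hsucc
          omega
        · have := hP.nzle; omega
        · intro a
          rw [hP.cols a, PySem.Set.mem_add]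
          constructor
          · rintro ((hv | hv) | ⟨x, hx, he⟩)
            · exact Or.inl hv
            · exact Or.inr ⟨p, Reach.base p List.mem_cons_self h0, hv.symm⟩
            · exact Or.inr ⟨x, (hhead x).2 (Or.inr hx), he⟩
          · rintro (hv | ⟨x, hx, he⟩)
            · exact Or.inl (Or.inl hv)
            · rcases (hhead x).1 hx with hxp | hxr
              · subst hxp; exact Or.inl (Or.inr he.symm)
              · exact Or.inr ⟨x, hxr, he⟩
        · intro hv
          exact hP.nodup (PySem.Set.nodup_add vis p.2 hv)

theorem nzc_pos (g : List (List Int)) (i j : Int) (h : ¬ gget g i j = 0) : 0 < nzc g := by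
  have := nzc_gset0_succ g i j h; omega

-- B's sequential neighbour loop drills exactly the cells reachable from the neighbours
-- that are valid at loop entry
theorem fold_post (n m : Int) (fuel : Nat)
    (hfill : ∀ (g : List (List Int)) (r c : Int) (cols : List Int), ¬ gget g r c = 0 →
      nzc g ≤ fuel → Post g (Reach n m g [(r, c)]) 0 cols (fill n m fuel g r c cols)) :
    ∀ (qs : List (Int × Int)) (h : List (List Int)) (t : Int) (cs : List Int), nzc h ≤ fuel →
      Post h (Reach n m h (qs.filter (fun q => inb n m q.1 q.2 && (gget h q.1 q.2 == 1)))) t cs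
        (qs.foldl (fun st q =>
          if inb n m q.1 q.2 && (gget st.1 q.1 q.2 == 1) then
            ((fill n m fuel st.1 q.1 q.2 st.2.2).1,
              st.2.1 + (fill n m fuel st.1 q.1 q.2 st.2.2).2.1,
              (fill n m fuel st.1 q.1 q.2 st.2.2).2.2)
          else st) (h, t, cs)) := by
  intro qs
  induction qs with
  | nil =>
    intro h t cs _
    simp only [List.filter_nil, List.foldl_nil]
    exact Post_nil n m h t cs
  | cons q qs ih =>
    intro h t cs hfuel
    simp only [List.filter_cons, List.foldl_cons]
    by_cases hc : (inb n m q.1 q.2 && (gget h q.1 q.2 == 1)) = true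
    · rw [if_pos hc, if_pos hc]
      have hval : gget h q.1 q.2 = 1 := by
        have hc2 := hc
        rw [Bool.and_eq_true] at hc2
        simpa using hc2.2
    -- fill q's component first …
      have hF := hfill h q.1 q.2 cs (by rw [hval]; exact one_ne_zero) hfuel
      set res := fill n m fuel h q.1 q.2 cs with hresdef
      have hq_eta : ((q.1, q.2) : Int × Int) = q := rfl
      rw [hq_eta] at hF
      -- … then the remaining neighbours in the updated grid
      have hIH := ih res.1 (t + res.2.1) res.2.2 (le_trans hF.nzle hfuel)
      -- the remaining candidates valid in res.1 and those valid in h reach the same cells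
      have hsame : ∀ x, Reach n m res.1
            (qs.filter (fun p => inb n m p.1 p.2 && (gget res.1 p.1 p.2 == 1))) x ↔
          Reach n m res.1 (qs.filter (fun p => inb n m p.1 p.2 && (gget h p.1 p.2 == 1))) x := by
        intro x
        constructor
        · apply Reach_mono
          intro y hy
          rcases List.mem_filter.1 hy with ⟨hyq, hyv⟩
          rw [Bool.and_eq_true] at hyv
          rcases hyv with ⟨hyb, hyv1⟩
          have hy1 : gget res.1 y.1 y.2 = 1 := by simpa using hyv1
          have hnr : ¬ Reach n m h [q] y := by
            intro hr
            rw [hF.zero y hr] at hy1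
            exact absurd hy1 (by norm_num)
          left
          refine List.mem_filter.2 ⟨hyq, ?_⟩
          rw [Bool.and_eq_true]
          refine ⟨hyb, ?_⟩
          rw [← hF.keep y hnr]
          simpa using hy1
        · apply Reach_mono
          intro y hy
          rcases List.mem_filter.1 hy with ⟨hyq, hyv⟩
          rw [Bool.and_eq_true] at hyv
          rcases hyv with ⟨hyb, hyv1⟩
          have hy1 : gget h y.1 y.2 = 1 := by simpa using hyv1
          by_cases hr : Reach n m h [q] y
          · right; exact hF.zero y hr
          · left
            refine List.mem_filter.2 ⟨hyq, ?_⟩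
            rw [Bool.and_eq_true]
            refine ⟨hyb, ?_⟩
            rw [hF.keep y hr]
            simpa using hy1
      have hseq := Reach_seq n m h res.1 [q]
        (qs.filter (fun p => inb n m p.1 p.2 && (gget h p.1 p.2 == 1))) hF.zero hF.keep
      have hgoalR : ∀ x,
          Reach n m h (q :: qs.filter (fun p => inb n m p.1 p.2 && (gget h p.1 p.2 == 1))) x ↔
            (Reach n m h [q] x ∨ Reach n m res.1
              (qs.filter (fun p => inb n m p.1 p.2 && (gget res.1 p.1 p.2 == 1))) x) := by
        intro x
        rw [show (q :: qs.filter (fun p => inb n m p.1 p.2 && (gget h p.1 p.2 == 1))) =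
          [q] ++ qs.filter (fun p => inb n m p.1 p.2 && (gget h p.1 p.2 == 1)) from rfl]
        rw [hseq x, hsame x]
      refine ⟨hIH.shape_eq.trans hF.shape_eq, ?_, ?_, ?_, ?_, ?_, ?_⟩
      · intro x hx
        rcases (hgoalR x).1 hx with hx1 | hx2
        · by_cases hr : Reach n m res.1
              (qs.filter (fun p => inb n m p.1 p.2 && (gget res.1 p.1 p.2 == 1))) x
          · exact hIH.zero x hr
          · rw [hIH.keep x hr]; exact hF.zero x hx1
        · exact hIH.zero x hx2
      · intro x hx
        have hx1 : ¬ Reach n m h [q] x := fun hr => hx ((hgoalR x).2 (Or.inl hr))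
        have hx2 : ¬ Reach n m res.1
            (qs.filter (fun p => inb n m p.1 p.2 && (gget res.1 p.1 p.2 == 1))) x :=
          fun hr => hx ((hgoalR x).2 (Or.inr hr))
        rw [hIH.keep x hx2]
        exact hF.keep x hx1
      · have h1 := hIH.cnt
        have h2 := hF.cnt
        rw [h1]
        have hle1 := hF.nzle
        have hle2 := hIH.nzle
        omega
      · exact le_trans hIH.nzle hF.nzle
      · intro a
        rw [hIH.cols a]
        constructor
        · rintro (hv | ⟨x, hx, he⟩)
          · rcases (hF.cols a).1 hv with hv2 | ⟨x, hx, he⟩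
            · exact Or.inl hv2
            · exact Or.inr ⟨x, (hgoalR x).2 (Or.inl hx), he⟩
          · exact Or.inr ⟨x, (hgoalR x).2 (Or.inr hx), he⟩
        · rintro (hv | ⟨x, hx, he⟩)
          · exact Or.inl ((hF.cols a).2 (Or.inl hv))
          · rcases (hgoalR x).1 hx with hx1 | hx2
            · exact Or.inl ((hF.cols a).2 (Or.inr ⟨x, hx1, he⟩))
            · exact Or.inr ⟨x, hx2, he⟩
      · intro hv
        exact hIH.nodup (hF.nodup hv)
    · rw [if_neg hc, if_neg hc]
      exact ih h t cs hfuel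

-- B's recursive DFS drills exactly the cells reachable from its seed
theorem fill_post (n m : Int) : ∀ (fuel : Nat) (g : List (List Int)) (r c : Int)
    (cols : List Int), ¬ gget g r c = 0 → nzc g ≤ fuel →
    Post g (Reach n m g [(r, c)]) 0 cols (fill n m fuel g r c cols) := by
  intro fuel
  induction fuel with
  | zero =>
    intro g r c cols h0 hf
    exact absurd hf (by have := nzc_pos g r c h0; omega)
  | succ fuel ih =>
    intro g r c cols h0 hf
    have hsucc := nzc_gset0_succ g r c h0
    have hFold := fold_post n m fuel ih
      [(r + 1, c), (r - 1, c), (r, c + 1), (r, c - 1)]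
      (gset0 g r c) 1 (PySem.Set.add cols c) (by omega)
    simp only [fill]
    set g0 := gset0 g r c with hg0
    have hhead := Reach_head n m g (r, c) [] h0
    have hmemiff : ∀ x : Int × Int,
        x ∈ ([] ++ nbrsA n m g0 r c) ↔
          x ∈ ([(r + 1, c), (r - 1, c), (r, c + 1), (r, c - 1)] : List (Int × Int)).filter
            (fun q => inb n m q.1 q.2 && (gget g0 q.1 q.2 == 1)) := by
      intro x
      rw [List.nil_append, mem_nbrsA, List.mem_filter, Bool.and_eq_true]
      simp only [adj, List.mem_cons, List.not_mem_nil]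
      constructor
      · rintro ⟨hm, hb, hv⟩
        refine ⟨?_, hb, by simpa using hv⟩
        simp only [sub_eq_add_neg] at *
        tauto
      · rintro ⟨hm, hb, hv⟩
        refine ⟨?_, hb, by simpa using hv⟩
        simp only [sub_eq_add_neg] at *
        tauto
    have hgoalR : ∀ x, Reach n m g [(r, c)] x ↔ (x = (r, c) ∨ Reach n m g0
        (([(r + 1, c), (r - 1, c), (r, c + 1), (r, c - 1)] : List (Int × Int)).filter
          (fun q => inb n m q.1 q.2 && (gget g0 q.1 q.2 == 1))) x) := by
      intro x
      rw [hhead x]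
      constructor
      · rintro (hx | hx)
        · exact Or.inl hx
        · exact Or.inr (Reach_mono n m g0 _ _ (fun y hy => Or.inl ((hmemiff y).1 hy)) x hx)
      · rintro (hx | hx)
        · exact Or.inl hx
        · exact Or.inr (Reach_mono n m g0 _ _ (fun y hy => Or.inl ((hmemiff y).2 hy)) x hx)
    refine ⟨hFold.shape_eq.trans (shape_gset0 g r c), ?_, ?_, ?_, ?_, ?_, ?_⟩
    · intro x hx
      rcases (hgoalR x).1 hx with hx1 | hx2
      · subst hx1
        by_cases hr : Reach n m g0
            (([(r + 1, c), (r - 1, c), (r, c + 1), (r, c - 1)] : List (Int × Int)).filter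
              (fun q => inb n m q.1 q.2 && (gget g0 q.1 q.2 == 1))) (r, c)
        · exact hFold.zero _ hr
        · rw [hFold.keep _ hr]; exact gget_gset0_self g r c
      · exact hFold.zero x hx2
    · intro x hx
      have hx1 : x ≠ (r, c) := fun hc => hx ((hgoalR x).2 (Or.inl hc))
      have hx2 : ¬ Reach n m g0
          (([(r + 1, c), (r - 1, c), (r, c + 1), (r, c - 1)] : List (Int × Int)).filter
            (fun q => inb n m q.1 q.2 && (gget g0 q.1 q.2 == 1))) x :=
        fun hr => hx ((hgoalR x).2 (Or.inr hr))
      rw [hFold.keep x hx2]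
      exact gget_gset0_ne g r c x.1 x.2 (fun hc => hx1 (Prod.ext hc.1 hc.2))
    · have h1 := hFold.cnt
      have hle := hFold.nzle
      rw [h1]
      omega
    · have := hFold.nzle; omega
    · intro a
      rw [hFold.cols a, PySem.Set.mem_add]
      constructor
      · rintro ((hv | hv) | ⟨x, hx, he⟩)
        · exact Or.inl hv
        · exact Or.inr ⟨(r, c), Reach.base _ List.mem_cons_self h0, hv.symm⟩
        · exact Or.inr ⟨x, (hgoalR x).2 (Or.inr hx), he⟩
      · rintro (hv | ⟨x, hx, he⟩)
        · exact Or.inl (Or.inl hv)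
        · rcases (hgoalR x).1 hx with hx1 | hx2
          · subst hx1; exact Or.inl (Or.inr he.symm)
          · exact Or.inr ⟨x, hx2, he⟩
    · intro hv
      exact hFold.nodup (PySem.Set.nodup_add cols c hv)

theorem getD_set_ne0 (l : List Int) (a a' : Nat) (x : Int) (h : a ≠ a') :
    (l.set a x).getD a' 0 = l.getD a' 0 := by
  have := getD_set_ne (α := Int) l a a' x h
  simpa using this

theorem bump_comm (k : Int) (a : List Int) (c1 c2 : Int) :
    bump (bump a c1 k) c2 k = bump (bump a c2 k) c1 k := by
  unfold bump
  by_cases h : c1.toNat = c2.toNat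
  · rw [h]
  · rw [getD_set_ne0 a c1.toNat c2.toNat _ h, getD_set_ne0 a c2.toNat c1.toNat _ (Ne.symm h),
      List.set_comm _ _ h]

theorem foldl_bump_perm (k : Int) (l1 l2 : List Int) (hp : l1.Perm l2) (ans : List Int) :
    l1.foldl (fun a c => bump a c k) ans = l2.foldl (fun a c => bump a c k) ans :=
  List.Perm.foldl_eq (rcomm := ⟨fun b c1 c2 => bump_comm k b c1 c2⟩) hp ans

-- the per-cell steps of the two ports agree on every loop state
theorem cell_eq (n m : Int) (st : List (List Int) × List Int) (i j : Int) :
    bfsCell n m st i j = dfsCell n m st i j := by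
  unfold bfsCell dfsCell
  by_cases h0 : gget st.1 i j = 0
  · rw [if_pos (by simpa using h0), if_pos (by simpa using h0)]
  · rw [if_neg (by simpa using h0), if_neg (by simpa using h0)]
    have hA := runQ_post n m (5 * nzc st.1 + 1) st.1 [(i, j)] 0 [] (by simp)
    have hB := fill_post n m (nzc st.1) st.1 i j [] h0 (le_refl _)
    set rA := runQ n m st.1 [(i, j)] 0 [] with hrA
    set rB := fill n m (nzc st.1) st.1 i j [] with hrB
    have hg : rA.1 = rB.1 := by
      apply grid_ext _ _ (hA.shape_eq.trans hB.shape_eq.symm)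
      intro a b
      by_cases hr : Reach n m st.1 [(i, j)] ((a : Int), (b : Int))
      · rw [hA.zero _ hr, hB.zero _ hr]
      · rw [hA.keep _ hr, hB.keep _ hr]
    have hcnt : rA.2.1 = rB.2.1 := by rw [hA.cnt, hB.cnt, hg]
    have hperm : rA.2.2.Perm rB.2.2 := by
      refine (List.perm_ext_iff_of_nodup (hA.nodup List.nodup_nil)
        (hB.nodup List.nodup_nil)).2 ?_
      intro a
      rw [hA.cols a, hB.cols a]
    show (rA.1, rA.2.2.foldl (fun ans col => bump ans col rA.2.1) st.2)
       = (rB.1, rB.2.2.foldl (fun best col => bump best col rB.2.1) st.2)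
    rw [hg, hcnt, foldl_bump_perm rB.2.1 rA.2.2 rB.2.2 hperm st.2]

theorem bfs_eq_dfs : bfsCell = dfsCell := by
  funext n m st i j
  exact cell_eq n m st i j

theorem main_eq (land : List (List Int)) : solution land = solution_alt land := by
  unfold solution solution_alt
  rw [bfs_eq_dfs]

-- ===== VERDICT (by name: the statement is the Claim_ definition above) =====
theorem solution_spec : Claim_equal_solution := by
  intro land _ _
  exact main_eq land
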